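-- pv_equiv track=rewrite | github.com/edwardzhu/checkio-solution | Scientific Expedition/landingStrip.py | count
-- ===== SOURCE A (Python) =====
-- def count(land, i, j, rocks, lbound, rbound):
--     if [i, j] in rocks:
--         return 0
--     possibleRocks = [e for e in rocks if i <= e[0] < lbound and j <= e[1] < rbound]
--     if len(possibleRocks) == 0:
--         return (lbound - i) * (rbound - j)
--
--     condition1 = 0
--     if len(possibleRocks) > 0:
--         possibleRocks.sort(key=lambda x: x[0])
--         lbounditem = possibleRocks[0]
--         condition1 = count(land, i, j, rocks, lbound, lbounditem[1])
--     else: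
--         lbounditem = [lbound, j]
--
--     condition2 = 0
--     if (len(possibleRocks)) > 0:
--         possibleRocks.sort(key=lambda x: x[1])
--         rbounditem = possibleRocks[0]
--         condition2 = count(land, i, j, rocks, rbounditem[0], rbound)
--     else:
--         rbounditem = [i, rbound]
--
--     if len(rbounditem) > 0 and len(lbounditem) > 0:
--         condition3 = (lbounditem[0] - i) * (rbounditem[1] - j)
--
--     return max(condition1, condition2, condition3)
-- ===== SOURCE B (Python) =====
-- def count(land, i, j, rocks, lbound, rbound):
--     # Memoized DP on the (lbound, rbound) state: i, j and rocks never change,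
--     # so each rectangle state is computed once; min selections replace the sorts.
--     if [i, j] in rocks:
--         return 0
--     memo = {}
--
--     def go(lb, rb):
--         key = (lb, rb)
--         if key in memo:
--             return memo[key]
--         p = [e for e in rocks if i <= e[0] < lb and j <= e[1] < rb]
--         if not p:
--             res = (lb - i) * (rb - j)
--         else:
--             r1 = min(p, key=lambda e: e[0])
--             r2 = min(p, key=lambda e: (e[1], e[0]))
--             res = max(go(lb, r1[1]), go(r2[0], rb), (r1[0] - i) * (r2[1] - j))
--         memo[key] = res
--         return res
--
--     return go(lbound, rbound)
-- ===== Notes on version B (the rewrite author's own statement) =====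
-- stated objective: alternative
-- what changed: B memoizes the recursion on its only changing state (lbound, rbound) in a dict so each rectangle state is computed once, replaces A's two stable sorts per call by single-pass min selections, and hoists the invariant [i,j]-in-rocks test out of the recursion.
import Mathlib
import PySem

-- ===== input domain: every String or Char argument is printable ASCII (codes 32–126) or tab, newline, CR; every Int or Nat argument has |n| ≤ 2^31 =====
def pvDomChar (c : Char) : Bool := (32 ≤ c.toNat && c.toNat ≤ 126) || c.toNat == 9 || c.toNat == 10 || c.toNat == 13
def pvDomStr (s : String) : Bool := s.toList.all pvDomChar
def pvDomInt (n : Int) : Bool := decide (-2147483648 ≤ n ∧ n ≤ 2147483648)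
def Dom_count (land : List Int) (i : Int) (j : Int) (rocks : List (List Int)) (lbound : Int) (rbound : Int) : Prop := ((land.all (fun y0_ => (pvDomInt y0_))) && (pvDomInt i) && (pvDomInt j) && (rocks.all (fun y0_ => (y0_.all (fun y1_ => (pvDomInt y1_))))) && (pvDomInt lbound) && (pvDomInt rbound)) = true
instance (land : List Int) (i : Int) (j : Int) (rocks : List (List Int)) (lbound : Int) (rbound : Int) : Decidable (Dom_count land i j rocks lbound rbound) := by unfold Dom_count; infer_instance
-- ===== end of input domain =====

-- B restructures A's recursion into a dict-memoized DP on the (lbound, rbound) state, with single-pass min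
-- selections instead of two stable sorts per call (objective: alternative).

-- ===== PORT A =====
theorem pyGetD_of_pyGet? {α : Type} {e : List α} {n : Int} {a : α} (d : α)
    (h : PySem.List.pyGet? e n = some a) : PySem.List.pyGetD e n d = a := by
  simp [PySem.List.pyGetD, h]

-- condition of A's/B's comprehension: i <= e[0] < lb and j <= e[1] < rb, short-circuit (e[1] only read when the first holds)
def inRect (i j lb rb : Int) (e : List Int) : Bool :=
  match PySem.List.pyGet? e 0 with
  | none => false
  | some a =>
    if i ≤ a ∧ a < lb then
      match PySem.List.pyGet? e 1 with
      | none => false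
      | some b => decide (j ≤ b ∧ b < rb)
    else false

theorem inRect_bounds {i j lb rb : Int} {e : List Int} (h : inRect i j lb rb e = true) :
    i ≤ PySem.List.pyGetD e 0 0 ∧ PySem.List.pyGetD e 0 0 < lb ∧
    j ≤ PySem.List.pyGetD e 1 0 ∧ PySem.List.pyGetD e 1 0 < rb := by
  unfold inRect at h
  cases h0 : PySem.List.pyGet? e 0 with
  | none => simp [h0] at h
  | some a =>
    rw [h0] at h
    by_cases hc : i ≤ a ∧ a < lb
    · simp only [hc, if_true, and_self, if_pos] at h
      cases h1 : PySem.List.pyGet? e 1 with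
      | none => simp [h1] at h
      | some b =>
        rw [h1] at h
        simp only [decide_eq_true_eq] at h
        rw [pyGetD_of_pyGet? 0 h0, pyGetD_of_pyGet? 0 h1]
        exact ⟨hc.1, hc.2, h.1, h.2⟩
    · simp [hc] at h

theorem mem_filter_inRect {i j lb rb : Int} {rocks : List (List Int)} {e : List Int}
    (h : e ∈ rocks.filter (inRect i j lb rb)) :
    i ≤ PySem.List.pyGetD e 0 0 ∧ PySem.List.pyGetD e 0 0 < lb ∧
    j ≤ PySem.List.pyGetD e 1 0 ∧ PySem.List.pyGetD e 1 0 < rb :=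
  inRect_bounds (List.mem_filter.mp h).2

theorem head0_sorted_mem {p : List (List Int)} (k : List Int → Int) (hp : p ≠ []) :
    PySem.List.pyGetD (PySem.List.sorted p k false) 0 [] ∈ p := by
  have hne : PySem.List.sorted p k false ≠ [] := by
    intro h; exact hp ((PySem.List.sorted_eq_nil_iff p k false).mp h)
  cases hs : PySem.List.sorted p k false with
  | nil => exact absurd hs hne
  | cons x t =>
    rw [PySem.List.pyGetD_zero_cons x t []]
    have hx : x ∈ PySem.List.sorted p k false := by rw [hs]; exact List.mem_cons_self
    exact (PySem.List.mem_sorted p k false x).mp hx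

def count (land : List Int) (i : Int) (j : Int) (rocks : List (List Int)) (lbound : Int) (rbound : Int) : Int :=
  if rocks.contains [i, j] then 0
  else if hp : rocks.filter (inRect i j lbound rbound) = [] then
    (lbound - i) * (rbound - j)
  else
    -- possibleRocks sorted by e[0]; its first element is lbounditem
    let lbounditem := PySem.List.pyGetD
      (PySem.List.sorted (rocks.filter (inRect i j lbound rbound)) (fun e => PySem.List.pyGetD e 0 0) false) 0 []
    -- the same list sorted again (stably) by e[1]; its first element is rbounditem
    let rbounditem := PySem.List.pyGetD
      (PySem.List.sorted (PySem.List.sorted (rocks.filter (inRect i j lbound rbound)) (fun e => PySem.List.pyGetD e 0 0) false)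
        (fun e => PySem.List.pyGetD e 1 0) false) 0 []
    let condition1 := count land i j rocks lbound (PySem.List.pyGetD lbounditem 1 0)
    let condition2 := count land i j rocks (PySem.List.pyGetD rbounditem 0 0) rbound
    let condition3 := (PySem.List.pyGetD lbounditem 0 0 - i) * (PySem.List.pyGetD rbounditem 1 0 - j)
    max (max condition1 condition2) condition3
termination_by ((lbound - i) + (rbound - j)).toNat
decreasing_by
  · simp only [List.unattach_filter, List.unattach_attach]
    have hm := mem_filter_inRect (head0_sorted_mem (fun e => PySem.List.pyGetD e 0 0) hp)
    omega
  · simp only [List.unattach_filter, List.unattach_attach]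
    have hp1 : PySem.List.sorted (rocks.filter (inRect i j lbound rbound)) (fun e => PySem.List.pyGetD e 0 0) false ≠ [] := by
      intro h; exact hp ((PySem.List.sorted_eq_nil_iff _ _ _).mp h)
    have hm2 := mem_filter_inRect ((PySem.List.mem_sorted _ _ _ _).mp
      (head0_sorted_mem (fun e => PySem.List.pyGetD e 1 0) hp1))
    have hm1 := mem_filter_inRect (head0_sorted_mem (fun e => PySem.List.pyGetD e 0 0) hp)
    omega


-- helpers the port of B needs (totality/termination of its min selections)
theorem foldl_opt_mem {α : Type} {f : Option α → α → Option α}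
    (hf : ∀ acc x, f acc x = acc ∨ f acc x = some x) :
    ∀ (xs : List α) (acc : Option α) (m : α), List.foldl f acc xs = some m → acc = some m ∨ m ∈ xs := by
  intro xs
  induction xs with
  | nil => intro acc m h; exact Or.inl h
  | cons x t ih =>
    intro acc m h
    rcases ih (f acc x) m h with h' | h'
    · rcases hf acc x with he | he
      · exact Or.inl (he ▸ h')
      · rw [he] at h'
        right; cases h'; exact List.mem_cons_self
    · exact Or.inr (List.mem_cons_of_mem x h')

theorem min2?_mem' {α : Type} {k1 k2 : α → Int} {xs : List α} {m : α}
    (h : PySem.List.min2? xs k1 k2 = some m) : m ∈ xs := by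
  unfold PySem.List.min2? at h
  rcases foldl_opt_mem (f := fun acc x =>
      match acc with
      | none => some x
      | some m => if (decide (k1 x < k1 m) || !decide (k1 m < k1 x) && decide (k2 x < k2 m)) = true then some x else some m)
    (by intro acc x; cases acc with
        | none => exact Or.inr rfl
        | some a => dsimp only; split
                    · exact Or.inr rfl
                    · exact Or.inl rfl) xs none m h with h' | h'
  · cases h'
  · exact h'

theorem foldl_opt_isSome {α : Type} {f : Option α → α → Option α}
    (hf : ∀ a x, (f a x).isSome) :
    ∀ (xs : List α) (acc : Option α), xs ≠ [] → (List.foldl f acc xs).isSome := by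
  intro xs
  induction xs with
  | nil => intro acc h; exact absurd rfl h
  | cons x t ih =>
    intro acc _
    simp only [List.foldl_cons]
    cases t with
    | nil => simpa using hf acc x
    | cons z zs => exact ih (f acc x) (by simp)

theorem min?_getD_mem {xs : List (List Int)} (k : List Int → Int) (h : xs ≠ []) :
    (PySem.List.min? xs k).getD [] ∈ xs := by
  cases hm : PySem.List.min? xs k with
  | none => exact absurd ((PySem.List.min?_eq_none_iff xs k).mp hm) h
  | some m => exact PySem.List.min?_mem hm

theorem min2?_getD_mem {xs : List (List Int)} (k1 k2 : List Int → Int) (h : xs ≠ []) :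
    (PySem.List.min2? xs k1 k2).getD [] ∈ xs := by
  cases hm : PySem.List.min2? xs k1 k2 with
  | none =>
    exfalso
    have hs : (PySem.List.min2? xs k1 k2).isSome := by
      unfold PySem.List.min2?
      apply foldl_opt_isSome _ xs none h
      intro a x
      cases a with
      | none => rfl
      | some m => dsimp only; split <;> rfl
    rw [hm] at hs
    cases hs
  | some m => exact min2?_mem' hm

-- ===== PORT B =====
-- B: the inner 'go' with the memo dict threaded through (Python closure state)
def goB (i : Int) (j : Int) (rocks : List (List Int)) (lb : Int) (rb : Int)
    (memo : PySem.Dict (Int × Int) Int) : Int × PySem.Dict (Int × Int) Int :=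
  match memo.get? (lb, rb) with
  | some v => (v, memo)
  | none =>
    if hp : rocks.filter (inRect i j lb rb) = [] then
      let res := (lb - i) * (rb - j)
      (res, memo.insert (lb, rb) res)
    else
      -- r1 = min(p, key=e[0]); r2 = min(p, key=(e[1], e[0])); both exist since p ≠ [] (.getD [] is a totality guard)
      let r1 := (PySem.List.min? (rocks.filter (inRect i j lb rb)) (fun e => PySem.List.pyGetD e 0 0)).getD []
      let r2 := (PySem.List.min2? (rocks.filter (inRect i j lb rb)) (fun e => PySem.List.pyGetD e 1 0) (fun e => PySem.List.pyGetD e 0 0)).getD []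
      let c1 := goB i j rocks lb (PySem.List.pyGetD r1 1 0) memo
      let c2 := goB i j rocks (PySem.List.pyGetD r2 0 0) rb c1.2
      let res := max (max c1.1 c2.1) ((PySem.List.pyGetD r1 0 0 - i) * (PySem.List.pyGetD r2 1 0 - j))
      (res, c2.2.insert (lb, rb) res)
termination_by ((lb - i) + (rb - j)).toNat
decreasing_by
  · simp only [List.unattach_filter, List.unattach_attach]
    have hm := mem_filter_inRect (min?_getD_mem (fun e => PySem.List.pyGetD e 0 0) hp)
    omega
  · simp only [List.unattach_filter, List.unattach_attach]
    have hm := mem_filter_inRect (min?_getD_mem (fun e => PySem.List.pyGetD e 0 0) hp)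
    have hm2 := mem_filter_inRect (min2?_getD_mem (fun e => PySem.List.pyGetD e 1 0) (fun e => PySem.List.pyGetD e 0 0) hp)
    omega

def count_alt (land : List Int) (i : Int) (j : Int) (rocks : List (List Int)) (lbound : Int) (rbound : Int) : Int :=
  if rocks.contains [i, j] then 0
  else (goB i j rocks lbound rbound PySem.Dict.empty).1

-- ===== PRECONDITION & SPEC =====
-- Pre_count excludes exactly the inputs on which A raises an IndexError: some rock list is empty, or is a
-- singleton [x] with i <= x < lbound (then A's comprehension evaluates the missing e[1]); unless [i, j] is
-- itself a rock, in which case A returns 0 before filtering.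
def Pre_count (land : List Int) (i : Int) (j : Int) (rocks : List (List Int)) (lbound : Int) (rbound : Int) : Prop :=
  [i, j] ∈ rocks ∨ ∀ e ∈ rocks, 2 ≤ e.length ∨
    (e.length = 1 ∧ ¬(i ≤ PySem.List.pyGetD e 0 0 ∧ PySem.List.pyGetD e 0 0 < lbound))
instance (land : List Int) (i : Int) (j : Int) (rocks : List (List Int)) (lbound : Int) (rbound : Int) : Decidable (Pre_count land i j rocks lbound rbound) := by unfold Pre_count; infer_instance

def pvWitness_count : List Int × Int × Int × List (List Int) × Int × Int := ([], 0, 0, [[1, 1], [2, 0]], 3, 4)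

def Spec_count (land : List Int) (i : Int) (j : Int) (rocks : List (List Int)) (lbound : Int) (rbound : Int) (out : Int) : Prop := out = count_alt land i j rocks lbound rbound
instance (land : List Int) (i : Int) (j : Int) (rocks : List (List Int)) (lbound : Int) (rbound : Int) (out : Int) : Decidable (Spec_count land i j rocks lbound rbound out) := by unfold Spec_count; infer_instance

-- ===== CLAIM (what is proved, stated in full; the proofs are below) =====
def Claim_equal_count : Prop := ∀ (land : List Int) (i : Int) (j : Int) (rocks : List (List Int)) (lbound : Int) (rbound : Int), Dom_count land i j rocks lbound rbound → Pre_count land i j rocks lbound rbound → Spec_count land i j rocks lbound rbound (count land i j rocks lbound rbound)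

-- ===== LEMMAS AND PROOFS =====
-- ===== proof machinery =====

def minStep (k : List Int → Int) (acc : Option (List Int)) (x : List Int) : Option (List Int) :=
  match acc with
  | none => some x
  | some m => if k x < k m then some x else some m

def min2Step (k1 k2 : List Int → Int) (acc : Option (List Int)) (x : List Int) : Option (List Int) :=
  match acc with
  | none => some x
  | some m => if (decide (k1 x < k1 m) || !decide (k1 m < k1 x) && decide (k2 x < k2 m)) = true then some x else some m

theorem min?_eq_foldl (xs : List (List Int)) (k : List Int → Int) :
    PySem.List.min? xs k = List.foldl (minStep k) none xs := by
  unfold PySem.List.min? minStep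
  congr 1
  funext acc x
  cases acc <;> rfl

theorem min2?_eq_foldl (xs : List (List Int)) (k1 k2 : List Int → Int) :
    PySem.List.min2? xs k1 k2 = List.foldl (min2Step k1 k2) none xs := by
  unfold PySem.List.min2? min2Step
  congr 1
  funext acc x
  cases acc <;> rfl

theorem head?_insertBy (k : List Int → Int) (x : List Int) (acc : List (List Int)) :
    (PySem.List.insertBy (fun a b => decide (k a < k b)) x acc).head? = minStep k acc.head? x := by
  cases acc with
  | nil => simp [PySem.List.insertBy, minStep]
  | cons y ys =>
    simp only [PySem.List.insertBy, minStep, List.head?_cons]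
    split <;> simp_all

theorem head?_foldl_insertBy (k : List Int → Int) :
    ∀ (xs : List (List Int)) (acc : List (List Int)),
      (List.foldl (fun a x => PySem.List.insertBy (fun a b => decide (k a < k b)) x a) acc xs).head?
        = List.foldl (minStep k) acc.head? xs := by
  intro xs
  induction xs with
  | nil => intro acc; rfl
  | cons x t ih =>
    intro acc
    simp only [List.foldl_cons, ih, head?_insertBy]

theorem head?_sorted_eq_min? (xs : List (List Int)) (k : List Int → Int) :
    (PySem.List.sorted xs k false).head? = PySem.List.min? xs k := by
  rw [min?_eq_foldl]
  have h : PySem.List.sorted xs k false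
      = List.foldl (fun a x => PySem.List.insertBy (fun a b => decide (k a < k b)) x a) [] xs := by
    simp [PySem.List.sorted]
  rw [h, head?_foldl_insertBy]
  rfl

theorem min2Step_aux (k1 k2 : List Int → Int) :
    ∀ (xs : List (List Int)) (acc : Option (List Int)) (m : List Int),
      List.foldl (min2Step k1 k2) acc xs = some m →
      (∀ a, acc = some a → k1 m ≤ k1 a ∧ (k1 a ≤ k1 m → k2 m ≤ k2 a)) ∧
      (∀ y ∈ xs, k1 m ≤ k1 y ∧ (k1 y ≤ k1 m → k2 m ≤ k2 y)) := by
  intro xs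
  induction xs with
  | nil =>
    intro acc m h
    simp only [List.foldl_nil] at h
    subst h
    exact ⟨fun a ha => by cases ha; exact ⟨le_refl _, fun _ => le_refl _⟩, by simp⟩
  | cons x t ih =>
    intro acc m h
    simp only [List.foldl_cons] at h
    obtain ⟨hacc', ht⟩ := ih (min2Step k1 k2 acc x) m h
    have hx : k1 m ≤ k1 x ∧ (k1 x ≤ k1 m → k2 m ≤ k2 x) := by
      cases acc with
      | none => exact hacc' x rfl
      | some a =>
        simp only [min2Step] at hacc'
        split at hacc'
        · exact hacc' x rfl
        · rename_i hcond
          simp only [Bool.or_eq_true, Bool.and_eq_true, Bool.not_eq_true', decide_eq_true_eq,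
            decide_eq_false_iff_not, not_or, not_and, not_lt] at hcond
          have ha := hacc' a rfl
          constructor
          · omega
          · intro hxm
            have h1 : k1 a ≤ k1 x := hcond.1
            have := hcond.2
            omega
    have haccQ : ∀ a, acc = some a → k1 m ≤ k1 a ∧ (k1 a ≤ k1 m → k2 m ≤ k2 a) := by
      intro a ha
      subst ha
      simp only [min2Step] at hacc'
      split at hacc'
      · rename_i hcond
        simp only [Bool.or_eq_true, Bool.and_eq_true, Bool.not_eq_true', decide_eq_true_eq,
          decide_eq_false_iff_not, not_lt] at hcond
        have hxq := hacc' x rfl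
        constructor
        · omega
        · intro ham
          omega
      · exact hacc' a rfl
    refine ⟨haccQ, ?_⟩
    intro y hy
    rcases List.mem_cons.mp hy with hyx | hyt
    · subst hyx; exact hx
    · exact ht y hyt

theorem min2?_isMin {k1 k2 : List Int → Int} {xs : List (List Int)} {m : List Int}
    (h : PySem.List.min2? xs k1 k2 = some m) :
    ∀ y ∈ xs, k1 m ≤ k1 y ∧ (k1 y ≤ k1 m → k2 m ≤ k2 y) := by
  rw [min2?_eq_foldl] at h
  exact (min2Step_aux k1 k2 xs none m h).2

theorem minStep_foldl_cases (k1 : List Int → Int) :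
    ∀ (Q : List (List Int)) (acc : Option (List Int)) (m : List Int),
      List.foldl (minStep k1) acc Q = some m →
      acc = some m ∨ (m ∈ Q ∧ ∀ a, acc = some a → k1 m < k1 a) := by
  intro Q
  induction Q with
  | nil => intro acc m h; exact Or.inl h
  | cons x t ih =>
    intro acc m h
    simp only [List.foldl_cons] at h
    rcases ih (minStep k1 acc x) m h with h' | ⟨hm, hlt⟩
    · cases acc with
      | none =>
        simp only [minStep] at h'
        cases h'
        exact Or.inr ⟨List.mem_cons_self, by intro a ha; cases ha⟩
      | some a =>
        simp only [minStep] at h'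
        split at h'
        · rename_i hcond
          cases h'
          exact Or.inr ⟨List.mem_cons_self, by intro a' ha'; cases ha'; exact hcond⟩
        · exact Or.inl h'
    · right
      refine ⟨List.mem_cons_of_mem x hm, ?_⟩
      intro a ha
      subst ha
      cases hstep : minStep k1 (some a) x with
      | none => simp [minStep] at hstep; split at hstep <;> cases hstep
      | some a' =>
        have := hlt a' hstep
        simp only [minStep] at hstep
        split at hstep <;> rename_i hcond
        · cases hstep; omega
        · cases hstep; omega

theorem min?_pairwise (k0 k1 : List Int → Int) :
    ∀ (Q : List (List Int)) (acc : Option (List Int)) (m : List Int),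
      Q.Pairwise (fun a b => k0 a ≤ k0 b) →
      List.foldl (minStep k1) acc Q = some m →
      ∀ y ∈ Q, k1 y ≤ k1 m → acc = some m ∨ k0 m ≤ k0 y := by
  intro Q
  induction Q with
  | nil => intro acc m _ _ y hy; cases hy
  | cons x t ih =>
    intro acc m hpw h y hy hk
    simp only [List.foldl_cons] at h
    have hpwx := (List.pairwise_cons.mp hpw).1
    have hpwt := (List.pairwise_cons.mp hpw).2
    rcases List.mem_cons.mp hy with hyx | hyt
    · -- y = x, the head
      subst hyx
      rcases minStep_foldl_cases k1 t (minStep k1 acc y) m h with h' | ⟨hm, hlt⟩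
      · -- result came from the step on x
        cases acc with
        | none =>
          simp only [minStep] at h'
          cases h'
          exact Or.inr (le_refl _)
        | some a =>
          simp only [minStep] at h'
          split at h'
          · cases h'; exact Or.inr (le_refl _)
          · exact Or.inl h'
      · -- m found later in t, strictly better than step acc x: contradicts k1 y ≤ k1 m
        exfalso
        cases acc with
        | none =>
          have := hlt y (by simp [minStep])
          omega
        | some a =>
          cases hstep : minStep k1 (some a) y with
          | none => simp only [minStep] at hstep; split at hstep <;> cases hstep
          | some a' =>
            have := hlt a' hstep
            simp only [minStep] at hstep
            split at hstep <;> rename_i hcond <;> cases hstep <;> omega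
    · -- y in the tail
      rcases ih (minStep k1 acc x) m hpwt h y hyt hk with h' | h'
      · -- step acc x = some m
        cases acc with
        | none =>
          simp only [minStep] at h'
          cases h'
          exact Or.inr (hpwx y hyt)
        | some a =>
          simp only [minStep] at h'
          split at h'
          · cases h'; exact Or.inr (hpwx y hyt)
          · exact Or.inl h'
      · exact Or.inr h'

theorem min?_sorted_eq {k0 k1 : List Int → Int} {p : List (List Int)} {rA rB : List Int}
    (hA : PySem.List.min? (PySem.List.sorted p k0 false) k1 = some rA)
    (hB : PySem.List.min2? p k1 k0 = some rB) :
    k0 rA = k0 rB ∧ k1 rA = k1 rB := by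
  have hAmem : rA ∈ p := (PySem.List.mem_sorted p k0 false rA).mp (PySem.List.min?_mem hA)
  have hBmem : rB ∈ p := min2?_mem' hB
  have hBmem' : rB ∈ PySem.List.sorted p k0 false := (PySem.List.mem_sorted p k0 false rB).mpr hBmem
  have h1 : k1 rA ≤ k1 rB := PySem.List.min?_isMin hA rB hBmem'
  have h2 := min2?_isMin hB rA hAmem
  have hk1 : k1 rA = k1 rB := le_antisymm h1 h2.1
  have h3 : k0 rB ≤ k0 rA := h2.2 (le_of_eq hk1)
  have h4 : k0 rA ≤ k0 rB := by
    have := min?_pairwise k0 k1 (PySem.List.sorted p k0 false) none rA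
      (PySem.List.sorted_pairwise p k0) (by rw [min?_eq_foldl] at hA; exact hA) rB hBmem' (le_of_eq hk1.symm)
    rcases this with h | h
    · cases h
    · exact h
  exact ⟨le_antisymm h4 h3, hk1⟩

theorem pyGetD_zero_head {xs : List (List Int)} (h : xs ≠ []) :
    some (PySem.List.pyGetD xs 0 []) = xs.head? := by
  cases xs with
  | nil => exact absurd rfl h
  | cons x t => rw [PySem.List.pyGetD_zero_cons x t []]; rfl

theorem min?_some_of_ne_nil {xs : List (List Int)} (k : List Int → Int) (h : xs ≠ []) :
    ∃ m, PySem.List.min? xs k = some m := by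
  cases hm : PySem.List.min? xs k with
  | none => exact absurd ((PySem.List.min?_eq_none_iff xs k).mp hm) h
  | some m => exact ⟨m, rfl⟩

theorem min2?_some_of_ne_nil {xs : List (List Int)} (k1 k2 : List Int → Int) (h : xs ≠ []) :
    ∃ m, PySem.List.min2? xs k1 k2 = some m := by
  cases hm : PySem.List.min2? xs k1 k2 with
  | none =>
    exfalso
    have hs : (PySem.List.min2? xs k1 k2).isSome := by
      unfold PySem.List.min2?
      apply foldl_opt_isSome _ xs none h
      intro a x
      cases a with
      | none => rfl
      | some m => dsimp only; split <;> rfl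
    rw [hm] at hs
    cases hs
  | some m => exact ⟨m, rfl⟩


def MemoOK (land : List Int) (i j : Int) (rocks : List (List Int)) (memo : PySem.Dict (Int × Int) Int) : Prop :=
  ∀ q v, memo.get? q = some v → v = count land i j rocks q.1 q.2

theorem MemoOK_insert {land : List Int} {i j : Int} {rocks : List (List Int)}
    {memo : PySem.Dict (Int × Int) Int} {lb rb res : Int}
    (hm : MemoOK land i j rocks memo) (hres : res = count land i j rocks lb rb) :
    MemoOK land i j rocks (memo.insert (lb, rb) res) := by
  intro q v hq
  rw [PySem.Dict.get?_insert] at hq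
  split at hq
  · rename_i hql
    cases hq
    subst hql
    exact hres
  · exact hm q v hq

theorem goB_correct (land : List Int) (i j : Int) (rocks : List (List Int))
    (hc : rocks.contains [i, j] = false) :
    ∀ (lb rb : Int) (memo : PySem.Dict (Int × Int) Int), MemoOK land i j rocks memo →
      (goB i j rocks lb rb memo).1 = count land i j rocks lb rb ∧
      MemoOK land i j rocks (goB i j rocks lb rb memo).2 := by
  intro lb rb memo
  induction lb, rb, memo using goB.induct (i := i) (j := j) (rocks := rocks) with
  | case1 lb rb memo v h =>
    intro hm
    rw [goB.eq_def, h]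
    exact ⟨hm (lb, rb) v h, hm⟩
  | case2 lb rb memo h hp =>
    intro hm
    rw [goB.eq_def, h]
    simp only [dif_pos hp]
    have hcount : count land i j rocks lb rb = (lb - i) * (rb - j) := by
      rw [count.eq_def, if_neg (by rw [hc]; exact Bool.false_ne_true), dif_pos hp]
    exact ⟨hcount.symm, MemoOK_insert hm hcount.symm⟩
  | case3 lb rb memo h hp r1 r2 c1 ihA ihA' ihB =>
    intro hm
    have hr1 : r1 = (PySem.List.min? (rocks.filter (inRect i j lb rb)) (fun e => PySem.List.pyGetD e 0 0)).getD [] := by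
      simp only [r1, List.unattach_filter, List.unattach_attach]
    have hr2 : r2 = (PySem.List.min2? (rocks.filter (inRect i j lb rb)) (fun e => PySem.List.pyGetD e 1 0) (fun e => PySem.List.pyGetD e 0 0)).getD [] := by
      simp only [r2, List.unattach_filter, List.unattach_attach]
    have hc1 : c1 = goB i j rocks lb (PySem.List.pyGetD r1 1 0) memo := rfl
    obtain ⟨m1, hmin1⟩ := min?_some_of_ne_nil (fun e => PySem.List.pyGetD e 0 0) hp
    obtain ⟨m2, hmin2⟩ := min2?_some_of_ne_nil (fun e => PySem.List.pyGetD e 1 0) (fun e => PySem.List.pyGetD e 0 0) hp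
    have hr1' : r1 = m1 := by rw [hr1, hmin1]; rfl
    have hr2' : r2 = m2 := by rw [hr2, hmin2]; rfl
    obtain ⟨ihv1, ihm1⟩ := ihA hm
    have ihm1' : MemoOK land i j rocks c1.2 := by rw [hc1]; exact ihm1
    obtain ⟨ihv2, ihm2⟩ := ihB ihm1'
    -- identify A's sorted-head selections with B's min selections
    have hs1 : PySem.List.sorted (rocks.filter (inRect i j lb rb)) (fun e => PySem.List.pyGetD e 0 0) false ≠ [] := by
      intro hnil; exact hp ((PySem.List.sorted_eq_nil_iff _ _ _).mp hnil)
    have hlb : some (PySem.List.pyGetD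
        (PySem.List.sorted (rocks.filter (inRect i j lb rb)) (fun e => PySem.List.pyGetD e 0 0) false) 0 []) = some m1 := by
      rw [pyGetD_zero_head hs1, head?_sorted_eq_min?, hmin1]
    have hlb' := Option.some.inj hlb
    have hs2 : PySem.List.sorted (PySem.List.sorted (rocks.filter (inRect i j lb rb)) (fun e => PySem.List.pyGetD e 0 0) false)
        (fun e => PySem.List.pyGetD e 1 0) false ≠ [] := by
      intro hnil; exact hs1 ((PySem.List.sorted_eq_nil_iff _ _ _).mp hnil)
    have hrbA : PySem.List.min? (PySem.List.sorted (rocks.filter (inRect i j lb rb)) (fun e => PySem.List.pyGetD e 0 0) false)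
        (fun e => PySem.List.pyGetD e 1 0) = some (PySem.List.pyGetD
          (PySem.List.sorted (PySem.List.sorted (rocks.filter (inRect i j lb rb)) (fun e => PySem.List.pyGetD e 0 0) false)
            (fun e => PySem.List.pyGetD e 1 0) false) 0 []) := by
      rw [← head?_sorted_eq_min?, ← pyGetD_zero_head hs2]
    have hvals := min?_sorted_eq (k0 := fun e => PySem.List.pyGetD e 0 0) (k1 := fun e => PySem.List.pyGetD e 1 0) hrbA hmin2
    have hv0 : PySem.List.pyGetD (PySem.List.pyGetD
          (PySem.List.sorted (PySem.List.sorted (rocks.filter (inRect i j lb rb)) (fun e => PySem.List.pyGetD e 0 0) false)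
            (fun e => PySem.List.pyGetD e 1 0) false) 0 []) 0 0 = PySem.List.pyGetD m2 0 0 := hvals.1
    have hv1 : PySem.List.pyGetD (PySem.List.pyGetD
          (PySem.List.sorted (PySem.List.sorted (rocks.filter (inRect i j lb rb)) (fun e => PySem.List.pyGetD e 0 0) false)
            (fun e => PySem.List.pyGetD e 1 0) false) 0 []) 1 0 = PySem.List.pyGetD m2 1 0 := hvals.2
    have hcount : count land i j rocks lb rb
        = max (max (count land i j rocks lb (PySem.List.pyGetD m1 1 0))
                   (count land i j rocks (PySem.List.pyGetD m2 0 0) rb))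
              ((PySem.List.pyGetD m1 0 0 - i) * (PySem.List.pyGetD m2 1 0 - j)) := by
      rw [count.eq_def, if_neg (by rw [hc]; exact Bool.false_ne_true), dif_neg hp]
      dsimp only
      rw [hlb', hv0, hv1]
    rw [goB.eq_def, h]
    simp only [dif_neg hp]
    rw [← hr1, ← hr2, ← hc1, hr1', hr2']
    have hres : max (max c1.1 (goB i j rocks (PySem.List.pyGetD m2 0 0) rb c1.2).1)
        ((PySem.List.pyGetD m1 0 0 - i) * (PySem.List.pyGetD m2 1 0 - j)) = count land i j rocks lb rb := by
      rw [hr1'] at ihv1 hc1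
      rw [hr2'] at ihv2
      rw [hc1] at ihv2 ⊢
      rw [ihv1, ihv2, hcount]
    constructor
    · exact hres
    · rw [hr2'] at ihm2
      exact MemoOK_insert ihm2 hres

theorem count_eq_count_alt (land : List Int) (i j : Int) (rocks : List (List Int)) (lbound rbound : Int) :
    count land i j rocks lbound rbound = count_alt land i j rocks lbound rbound := by
  by_cases hcon : rocks.contains [i, j] = true
  · rw [count.eq_def, count_alt, if_pos hcon, if_pos hcon]
  · have hc : rocks.contains [i, j] = false := by
      cases hb : rocks.contains [i, j]
      · rfl
      · exact absurd hb hcon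
    have hempty : MemoOK land i j rocks PySem.Dict.empty := by
      intro q v hq
      rw [PySem.Dict.get?_empty] at hq
      cases hq
    rw [count_alt, if_neg hcon]
    exact ((goB_correct land i j rocks hc lbound rbound PySem.Dict.empty hempty).1).symm

-- ===== VERDICT (by name: the statement is the Claim_ definition above) =====
theorem count_spec : Claim_equal_count := by
  intro land i j rocks lbound rbound _ _
  unfold Spec_count
  exact count_eq_count_alt land i j rocks lbound rbound
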